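-- pv_equiv track=rewrite | github.com/Naseer-fez/Fitness_Tracker | routes/Workout/Calander.py | date_updates
-- ===== SOURCE A (Python) =====
-- notavailable='G'
--
-- Succues='S'
--
-- Notdone='N'
--
-- present='Y'
--
-- absent='R'
--
-- def date_updates(week, todaysdate, status):
--     size = len(week)
--
--     output = [
--         status if i == todaysdate
--         else week[i] if week[i] in (notavailable, present, Succues)
--         else Notdone
--         for i in range(size)
--     ]
--
--     flags = [i for i, v in enumerate(output) if v in (Succues, present)]
--
--     for start, end in zip(flags, flags[1:]):
--         for k in range(start + 1, end):
--             if output[k] == Notdone: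
--                 output[k] = absent
--
--     return output
-- ===== SOURCE B (Python) =====
-- notavailable='G'
-- Succues='S'
-- Notdone='N'
-- present='Y'
-- absent='R'
--
-- def date_updates(week, todaysdate, status):
--     output = [
--         status if i == todaysdate
--         else week[i] if week[i] in (notavailable, present, Succues)
--         else Notdone
--         for i in range(len(week))
--     ]
--     first = last = None
--     for i, v in enumerate(output):
--         if v == Succues or v == present:
--             if first is None:
--                 first = i
--             last = i
--     if first is not None and first < last:
--         output = [absent if first < k < last and v == Notdone else v
--                   for k, v in enumerate(output)]
--     return output
-- ===== Notes on version B (the rewrite author's own statement) =====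
-- stated objective: simpler
-- what changed: Replaces the flags list + nested fill loop over consecutive flag pairs by a single boundary scan for the first and last S/Y index and one flat pass flipping N to R strictly between them.
import Mathlib
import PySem

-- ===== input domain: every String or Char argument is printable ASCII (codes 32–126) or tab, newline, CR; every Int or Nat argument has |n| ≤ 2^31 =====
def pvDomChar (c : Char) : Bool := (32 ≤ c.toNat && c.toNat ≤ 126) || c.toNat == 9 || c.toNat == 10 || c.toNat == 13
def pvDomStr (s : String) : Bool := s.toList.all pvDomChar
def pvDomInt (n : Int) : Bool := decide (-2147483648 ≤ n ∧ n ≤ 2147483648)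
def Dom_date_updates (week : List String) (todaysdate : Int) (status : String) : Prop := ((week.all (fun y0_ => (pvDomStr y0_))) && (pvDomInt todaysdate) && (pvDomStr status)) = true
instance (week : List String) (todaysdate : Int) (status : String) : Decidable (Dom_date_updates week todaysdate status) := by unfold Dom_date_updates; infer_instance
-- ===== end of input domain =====

-- B replaces A's flags list + nested fill loop over consecutive flag pairs by a single
-- boundary scan (first/last S-or-Y index) and one flat pass flipping N to R strictly
-- between them (objective: simpler).

-- ===== PORT A =====
-- the list comprehension building `output` (identical first step of A and B)
def pvBuild (week : List String) (todaysdate : Int) (status : String) : List String :=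
  (PySem.List.pyRange 0 (week.length : Int) 1).map (fun i =>
    let w := PySem.List.pyGetD week i ""   -- week[i]; i always in range here
    if i == todaysdate then status
    else if w == "G" || w == "Y" || w == "S" then w
    else "N")

-- the inner `for k in range(start+1, end): if output[k] == Notdone: output[k] = absent`
def pvFillPair (out : List String) (se : Int × Int) : List String :=
  (PySem.List.pyRange (se.1 + 1) se.2 1).foldl
    (fun acc k => if PySem.List.pyGetD acc k "" == "N" then PySem.List.pySetD acc k "R" else acc)
    out

def date_updates (week : List String) (todaysdate : Int) (status : String) : List String :=
  let output := pvBuild week todaysdate status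
  let flags := ((PySem.List.enumerate output 0).filter (fun p => p.2 == "S" || p.2 == "Y")).map (·.1)
  (flags.zip (PySem.List.slice flags (some 1) none)).foldl pvFillPair output

-- ===== PORT B =====
-- the boundary scan: first = first S/Y index, last = last S/Y index
def pvScanStep (fl : Option Int × Option Int) (p : Int × String) : Option Int × Option Int :=
  if p.2 == "S" || p.2 == "Y" then (some (fl.1.getD p.1), some p.1) else fl

def date_updates_alt (week : List String) (todaysdate : Int) (status : String) : List String :=
  let output := pvBuild week todaysdate status
  match (PySem.List.enumerate output 0).foldl pvScanStep (none, none) with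
  | (some f, some l) =>
      if f < l then
        (PySem.List.enumerate output 0).map (fun p =>
          if f < p.1 ∧ p.1 < l ∧ p.2 == "N" then "R" else p.2)
      else output
  | _ => output

-- ===== PRECONDITION & SPEC =====
def Spec_date_updates (week : List String) (todaysdate : Int) (status : String) (out : List String) : Prop := out = date_updates_alt week todaysdate status
instance (week : List String) (todaysdate : Int) (status : String) (out : List String) : Decidable (Spec_date_updates week todaysdate status out) := by unfold Spec_date_updates; infer_instance

-- ===== CLAIM (what is proved, stated in full; the proofs are below) =====
def Claim_equal_date_updates : Prop := ∀ (week : List String) (todaysdate : Int) (status : String), Dom_date_updates week todaysdate status → Spec_date_updates week todaysdate status (date_updates week todaysdate status)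

-- ===== LEMMAS AND PROOFS =====

-- "some consecutive flag pair (s, e) has s < k < e"
def pvCovers : List Int → Int → Bool
  | x :: y :: t, k => (decide (x < k) && decide (k < y)) || pvCovers (y :: t) k
  | _, _ => false

-- one mutation step of the inner loop, pointwise
lemma pvStep_char (out : List String) (a : Int) (ha : 0 ≤ a) (k : Nat) :
    (if PySem.List.pyGetD out a "" == "N" then PySem.List.pySetD out a "R" else out)[k]?
      = if (k : Int) = a ∧ out[k]? = some "N" then some "R" else out[k]? := by
  obtain ⟨m, rfl⟩ : ∃ m : Nat, a = (m : Int) := ⟨a.toNat, (Int.toNat_of_nonneg ha).symm⟩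
  rw [PySem.List.pyGetD_natCast, PySem.List.pySetD_natCast]
  by_cases hk : k = m
  · subst hk
    cases hv : out[k]? with
    | none =>
      have hlen : out.length ≤ k := by simpa using List.getElem?_eq_none_iff.mp hv
      have hg : out.getD k "" = "" := by simp [List.getD_eq_getElem?_getD, hv]
      simp [hv, hlen]
    | some v =>
      have hlt : k < out.length := (List.getElem?_eq_some_iff.mp hv).1
      have hg : out.getD k "" = v := by simp [List.getD_eq_getElem?_getD, hv]
      have he : out[k] = v := (List.getElem?_eq_some_iff.mp hv).2
      by_cases hvN : v = "N"
      · subst hvN; simp [hg, he, List.getElem?_set, hlt]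
      · simp [hg, hv, he, hvN, List.getElem?_set]
  · have hki : ¬((k : Int) = (m : Int)) := by omega
    have hset : (out.set m "R")[k]? = out[k]? := by
      rw [List.getElem?_set]
      simp [Ne.symm hk]
    by_cases hN : out[m]?.getD "" = "N" <;> simp [hN, hset, hki]

-- the whole inner loop `for k in range(a, e)` pointwise
lemma pvFill_char (n : Nat) : ∀ (a e : Int) (out : List String), 0 ≤ a → n = (e - a).toNat →
    ∀ k : Nat,
    ((PySem.List.pyRange a e 1).foldl
        (fun acc k => if PySem.List.pyGetD acc k "" == "N" then PySem.List.pySetD acc k "R" else acc)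
        out)[k]?
      = if a ≤ (k : Int) ∧ (k : Int) < e ∧ out[k]? = some "N" then some "R" else out[k]? := by
  induction n with
  | zero =>
    intro a e out ha hn k
    have he : e ≤ a := by omega
    rw [PySem.List.pyRange_one_eq_nil he, List.foldl_nil, if_neg]
    rintro ⟨h1, h2, _⟩; omega
  | succ n ih =>
    intro a e out ha hn k
    have hae : a < e := by omega
    rw [PySem.List.pyRange_one_cons hae, List.foldl_cons,
      ih (a + 1) e _ (by omega) (by omega) k, pvStep_char out a ha]
    by_cases hN : out[k]? = some "N" <;> by_cases hka : (k : Int) = a <;>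
      split_ifs <;> first | rfl | omega | (simp_all <;> omega)

lemma pvCovers_gt_head : ∀ (y : Int) (t : List Int) (k : Int),
    (y :: t).Pairwise (· < ·) → pvCovers (y :: t) k = true → y < k := by
  intro y t
  induction t generalizing y with
  | nil => intro k _ hc; simp [pvCovers] at hc
  | cons z r ih =>
    intro k hs hc
    rcases (by simpa [pvCovers] using hc : (y < k ∧ k < z) ∨ pvCovers (z :: r) k = true) with h | h
    · exact h.1
    · have hz : y < z := (List.pairwise_cons.mp hs).1 z (by simp)
      exact lt_trans hz (ih z k (List.pairwise_cons.mp hs).2 h)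

lemma pvSorted_head_le_getLast : ∀ (y : Int) (t : List Int),
    (y :: t).Pairwise (· < ·) → y ≤ (y :: t).getLast (by simp) := by
  intro y t hs
  cases t with
  | nil => simp
  | cons z r =>
    rw [List.getLast_cons (by simp)]
    have hmem : (z :: r).getLast (by simp) ∈ z :: r := List.getLast_mem _
    exact le_of_lt ((List.pairwise_cons.mp hs).1 _ hmem)

lemma pvCovers_lt_last : ∀ (y : Int) (t : List Int) (k : Int),
    (y :: t).Pairwise (· < ·) → pvCovers (y :: t) k = true → k < (y :: t).getLast (by simp) := by
  intro y t
  induction t generalizing y with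
  | nil => intro k _ hc; simp [pvCovers] at hc
  | cons z r ih =>
    intro k hs hc
    rw [List.getLast_cons (by simp)]
    rcases (by simpa [pvCovers] using hc : (y < k ∧ k < z) ∨ pvCovers (z :: r) k = true) with h | h
    · exact lt_of_lt_of_le h.2 (pvSorted_head_le_getLast z r (List.pairwise_cons.mp hs).2)
    · exact ih z k (List.pairwise_cons.mp hs).2 h

lemma pvBetween_covers : ∀ (F : List Int), F.Pairwise (· < ·) → ∀ (k : Int),
    (∀ f, F.head? = some f → f < k) →
    (∀ (h : F ≠ []), k < F.getLast h) →
    k ∉ F → F ≠ [] → pvCovers F k = true := by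
  intro F
  induction F with
  | nil => intro _ _ _ _ _ h; exact absurd rfl h
  | cons x t ih =>
    intro hs k hhead hlast hmem _
    have hx : x < k := hhead x rfl
    cases t with
    | nil =>
      exact absurd (hlast (by simp)) (by simp [hx, not_lt, le_of_lt])
    | cons y r =>
      by_cases hky : k < y
      · simp [pvCovers, hx, hky]
      · have hyk : y < k := by
          rcases lt_or_eq_of_le (not_lt.mp hky) with h | h
          · exact h
          · exact absurd (show k ∈ x :: y :: r by simp [h]) hmem
        have hcov : pvCovers (y :: r) k = true := by
          apply ih (List.pairwise_cons.mp hs).2 k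
          · intro f hf; simp at hf; omega
          · intro h
            have := hlast (by simp)
            rwa [List.getLast_cons (by simp)] at this
          · intro hm; exact hmem (List.mem_cons_of_mem x hm)
          · simp
        simp [pvCovers, hcov]

-- the fold over consecutive flag pairs, pointwise
lemma pvChain_char : ∀ (F : List Int), F.Pairwise (· < ·) → (∀ x ∈ F, 0 ≤ x) →
    ∀ (out : List String) (k : Nat),
    ((F.zip F.tail).foldl pvFillPair out)[k]?
      = if pvCovers F (k : Int) = true ∧ out[k]? = some "N" then some "R" else out[k]? := by
  intro F
  induction F with
  | nil => intro _ _ out k; simp [pvCovers]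
  | cons x t ih =>
    cases t with
    | nil => intro _ _ out k; simp [pvCovers]
    | cons y r =>
      intro hs hnn out k
      have hzip : (x :: y :: r).zip (x :: y :: r).tail = (x, y) :: ((y :: r).zip (y :: r).tail) := rfl
      rw [hzip, List.foldl_cons]
      have hfill : ∀ j : Nat, (pvFillPair out (x, y))[j]? =
          if x + 1 ≤ (j : Int) ∧ (j : Int) < y ∧ out[j]? = some "N" then some "R" else out[j]? := by
        intro j
        have hx0 : (0 : Int) ≤ x := hnn x (by simp)
        exact pvFill_char ((y - (x + 1)).toNat) (x + 1) y out (by omega) rfl j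
      rw [ih (List.pairwise_cons.mp hs).2 (fun z hz => hnn z (by simp [hz])) (pvFillPair out (x, y)) k,
        hfill k]
      have hcov : pvCovers (x :: y :: r) (k : Int)
          = ((decide (x < (k : Int)) && decide ((k : Int) < y)) || pvCovers (y :: r) (k : Int)) := rfl
      rw [hcov]
      by_cases hc : pvCovers (y :: r) (k : Int) = true
      · have hyk : y < (k : Int) := pvCovers_gt_head y r _ (List.pairwise_cons.mp hs).2 hc
        simp only [hc, Bool.or_true, Bool.or_eq_true, Bool.and_eq_true, decide_eq_true_eq]
        split_ifs <;> first | rfl | omega | (simp_all <;> omega)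
      · simp only [hc, Bool.or_false, Bool.or_eq_true, Bool.and_eq_true, decide_eq_true_eq]
        split_ifs <;> first | rfl | omega | (simp_all <;> omega)

-- the boundary scan computes (head?, getLast?) of the flag list
lemma pvScan_char : ∀ (ps : List (Int × String)) (ab : Option Int × Option Int),
    ps.foldl pvScanStep ab =
      (((ps.filter (fun p => p.2 == "S" || p.2 == "Y")).map (·.1)).foldl (fun a i => some (a.getD i)) ab.1,
       ((ps.filter (fun p => p.2 == "S" || p.2 == "Y")).map (·.1)).foldl (fun _ i => some i) ab.2) := by
  intro ps
  induction ps with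
  | nil => intro ab; rfl
  | cons p t ih =>
    intro ab
    rw [List.foldl_cons]
    cases hp : (p.2 == "S" || p.2 == "Y") with
    | true =>
      rw [ih]
      simp [pvScanStep, hp]
    | false =>
      rw [ih]
      simp [pvScanStep, hp]

lemma pvFirstFold : ∀ (L : List Int) (a : Option Int),
    L.foldl (fun a i => some (a.getD i)) a = (match a with | some x => some x | none => L.head?) := by
  intro L
  induction L with
  | nil => intro a; cases a <;> rfl
  | cons x t ih =>
    intro a
    rw [List.foldl_cons, ih]
    cases a <;> rfl

lemma pvLastFold : ∀ (L : List Int) (b : Option Int),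
    L.foldl (fun _ i => some i) b = (match L.getLast? with | some y => some y | none => b) := by
  intro L
  induction L with
  | nil => intro b; rfl
  | cons x t ih =>
    intro b
    rw [List.foldl_cons, ih]
    cases t with
    | nil => rfl
    | cons c r =>
      rw [List.getLast?_cons_cons]
      cases h : (c :: r).getLast? with
      | none => simp at h
      | some y => rfl

-- A's pair-chain fold equals B's boundary formula, for any sorted nonneg flag list F
-- disjoint from the "N" positions of out
lemma pvMain (out : List String) (F : List Int)
    (hsort : F.Pairwise (· < ·)) (hnn : ∀ z ∈ F, 0 ≤ z)
    (hnotN : ∀ j : Nat, out[j]? = some "N" → ((j : Int) ∉ F)) :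
    (F.zip (PySem.List.slice F (some 1) none)).foldl pvFillPair out =
      (match (F.head?, F.getLast?) with
       | (some f, some l) =>
           if f < l then
             (PySem.List.enumerate out 0).map (fun p =>
               if f < p.1 ∧ p.1 < l ∧ p.2 == "N" then "R" else p.2)
           else out
       | _ => out) := by
  rw [PySem.List.slice_from_one]
  cases F with
  | nil => rfl
  | cons x t =>
    cases t with
    | nil =>
      show out = if x < x then _ else out
      rw [if_neg (lt_irrefl x)]
    | cons y r =>
      have hne : (y :: r) ≠ [] := by simp
      have hL : (x :: y :: r).getLast? = some ((y :: r).getLast hne) := by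
        rw [List.getLast?_eq_some_getLast (by simp), List.getLast_cons hne]
      have hxy : x < y := (List.pairwise_cons.mp hsort).1 y (by simp)
      have hxL : x < (y :: r).getLast hne :=
        lt_of_lt_of_le hxy (pvSorted_head_le_getLast y r (List.pairwise_cons.mp hsort).2)
      rw [show (x :: y :: r).head? = some x from rfl, hL]
      show _ = if x < (y :: r).getLast hne then _ else _
      rw [if_pos hxL]
      apply List.ext_getElem?
      intro k
      rw [pvChain_char _ hsort hnn out k, List.getElem?_map, PySem.List.getElem?_enumerate]
      cases hv : out[k]? with
      | none =>
        rw [if_neg (by rintro ⟨_, h⟩; simp at h)]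
        rfl
      | some v =>
        simp only [Option.map_some]
        by_cases hvN : v = "N"
        · subst hvN
          have hnotin : ((k : Int) ∉ (x :: y :: r)) := hnotN k hv
          by_cases hb : x < (k : Int) ∧ (k : Int) < (y :: r).getLast hne
          · have hcov : pvCovers (x :: y :: r) (k : Int) = true := by
              apply pvBetween_covers _ hsort _ _ _ hnotin (by simp)
              · intro f hf
                simp at hf
                omega
              · intro h
                rw [List.getLast_cons hne]
                exact hb.2
            rw [if_pos ⟨hcov, rfl⟩, if_pos (by simpa using hb)]
          · have hncov : ¬(pvCovers (x :: y :: r) (k : Int) = true) := by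
              intro hcov
              have h1 := pvCovers_gt_head x (y :: r) (k : Int) hsort hcov
              have h2 := pvCovers_lt_last x (y :: r) (k : Int) hsort hcov
              rw [List.getLast_cons hne] at h2
              exact hb ⟨h1, h2⟩
            rw [if_neg (by rintro ⟨h, _⟩; exact hncov h),
              if_neg (by intro h; exact hb ⟨by simpa using h.1, by simpa using h.2.1⟩)]
        · rw [if_neg (by rintro ⟨_, h⟩; exact hvN (by simpa using h)),
            if_neg (by rintro ⟨_, _, h⟩; exact hvN (by simpa using h))]

-- ===== VERDICT (by name: the statement is the Claim_ definition above) =====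
theorem date_updates_spec : Claim_equal_date_updates := by
  intro week td status _
  unfold Spec_date_updates date_updates date_updates_alt
  dsimp only
  rw [pvScan_char, pvFirstFold, pvLastFold]
  dsimp only
  set out := pvBuild week td status with hout
  set F := ((PySem.List.enumerate out 0).filter (fun p => p.2 == "S" || p.2 == "Y")).map (·.1) with hF
  have hs0 : (PySem.List.enumerate out 0).Pairwise (fun p q : Int × String => p.1 < q.1) :=
    PySem.List.pairwise_lt_enumerate out 0
  have hsort : F.Pairwise (· < ·) := List.pairwise_map.mpr (List.Pairwise.filter _ hs0)
  have hnn : ∀ z ∈ F, 0 ≤ z := by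
    intro z hz
    rw [hF, List.mem_map] at hz
    obtain ⟨p, hpf, rfl⟩ := hz
    rw [List.mem_filter] at hpf
    obtain ⟨k, hk, rfl⟩ := (PySem.List.mem_enumerate_iff _ _ _).mp hpf.1
    simp
  have hnotN : ∀ j : Nat, out[j]? = some "N" → ((j : Int) ∉ F) := by
    intro j hj hmem
    rw [hF, List.mem_map] at hmem
    obtain ⟨p, hpf, hpj⟩ := hmem
    rw [List.mem_filter] at hpf
    obtain ⟨hpe, hpred⟩ := hpf
    obtain ⟨k, hk, rfl⟩ := (PySem.List.mem_enumerate_iff _ _ _).mp hpe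
    have hkj : k = j := by simpa using hpj
    subst hkj
    have : out[k] = "N" := by
      have := List.getElem?_eq_getElem hk
      rw [hj] at this
      exact (Option.some.injEq _ _).mp this.symm
    rw [this] at hpred
    simp at hpred
  have hmatch : (match F.getLast? with | some y => some y | none => (none : Option Int)) = F.getLast? := by
    cases F.getLast? <;> rfl
  rw [hmatch]
  exact pvMain out F hsort hnn hnotN
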